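-- pv_equiv track=rewrite | github.com/udaypratapsingh09/DSL | dsl_assign1.py | find_pass_fail_absent
-- ===== SOURCE A (Python) =====
-- def find_pass_fail_absent(scores):
--     students = {"pass":0,"fail":0,"absent":0}
--     for i in scores:
--         if i == 0:
--             students["absent"]+=1
--         elif i <40:
--             students["fail"]+=1
--         else:
--             students["pass"]+=1
--
--     return students
-- ===== SOURCE B (Python) =====
-- def _bisect_left(a, x):
--     lo, hi = 0, len(a)
--     while lo < hi:
--         mid = (lo + hi) // 2
--         if a[mid] < x:
--             lo = mid + 1
--         else:
--             hi = mid
--     return lo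
--
-- def find_pass_fail_absent(scores):
--     a = sorted(scores)
--     below40 = _bisect_left(a, 40)
--     zero_lo = _bisect_left(a, 0)
--     zero_hi = _bisect_left(a, 1)
--     absent = zero_hi - zero_lo
--     fail = below40 - absent
--     return {"pass": len(a) - below40, "fail": fail, "absent": absent}
-- ===== Notes on version B (the rewrite author's own statement) =====
-- stated objective: alternative
-- what changed: Replaces the single branching dict-update loop with sort-then-search: sort the scores once and locate the three category boundaries with hand-written binary searches (rank of 40, 0 and 1), deriving the counts by subtracting ranks.
import Mathlib
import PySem

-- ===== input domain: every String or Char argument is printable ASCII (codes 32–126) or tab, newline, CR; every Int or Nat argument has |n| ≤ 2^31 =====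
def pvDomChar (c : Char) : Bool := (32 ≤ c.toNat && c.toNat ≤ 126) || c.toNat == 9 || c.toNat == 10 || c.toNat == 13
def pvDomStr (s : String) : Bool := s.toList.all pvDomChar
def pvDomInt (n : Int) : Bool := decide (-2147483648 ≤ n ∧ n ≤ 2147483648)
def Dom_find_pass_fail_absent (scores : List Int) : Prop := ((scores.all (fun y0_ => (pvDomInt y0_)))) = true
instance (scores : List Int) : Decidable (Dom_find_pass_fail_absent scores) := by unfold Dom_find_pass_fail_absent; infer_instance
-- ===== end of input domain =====

-- B replaces A's branching dict-update loop with sort-then-binary-search: sort once, find the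
-- ranks of 40, 0 and 1, and derive the three counts by subtracting ranks (alternative algorithm).

-- ===== PORT A =====
-- the loop body: one dict update per score, same branch order as the Python
def pvStepA (d : PySem.Dict String Int) (i : Int) : PySem.Dict String Int :=
  if i == 0 then d.modify "absent" 0 (· + 1)
  else if i < 40 then d.modify "fail" 0 (· + 1)
  else d.modify "pass" 0 (· + 1)

def find_pass_fail_absent (scores : List Int) : List (String × Int) :=
  let students : PySem.Dict String Int := PySem.Dict.ofList [("pass", 0), ("fail", 0), ("absent", 0)]
  (scores.foldl pvStepA students).items

-- ===== PORT B =====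
-- Source B's hand-written _bisect_left: the while-loop as recursion on hi - lo.
-- a[mid] is always in range when the caller passes hi ≤ a.length (lo < hi ≤ len);
-- the `none` arm of pyGet? is unreachable then.
def pvBisectLeft (a : List Int) (x : Int) (lo hi : Nat) : Nat :=
  if lo < hi then
    let mid := (lo + hi) / 2
    match PySem.List.pyGet? a (mid : Int) with
    | some v => if v < x then pvBisectLeft a x (mid + 1) hi else pvBisectLeft a x lo mid
    | none => lo
  else lo
termination_by hi - lo
decreasing_by all_goals omega

def find_pass_fail_absent_alt (scores : List Int) : List (String × Int) :=
  let a := PySem.List.sorted scores (fun x => x) false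
  let below40 : Int := (pvBisectLeft a 40 0 a.length : Int)
  let zero_lo : Int := (pvBisectLeft a 0 0 a.length : Int)
  let zero_hi : Int := (pvBisectLeft a 1 0 a.length : Int)
  let absent := zero_hi - zero_lo
  let fail := below40 - absent
  [("pass", (a.length : Int) - below40), ("fail", fail), ("absent", absent)]

-- ===== PRECONDITION & SPEC =====
def Spec_find_pass_fail_absent (scores : List Int) (out : List (String × Int)) : Prop := out = find_pass_fail_absent_alt scores
instance (scores : List Int) (out : List (String × Int)) : Decidable (Spec_find_pass_fail_absent scores out) := by unfold Spec_find_pass_fail_absent; infer_instance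

-- ===== CLAIM (what is proved, stated in full; the proofs are below) =====
def Claim_equal_find_pass_fail_absent : Prop := ∀ (scores : List Int), Dom_find_pass_fail_absent scores → Spec_find_pass_fail_absent scores (find_pass_fail_absent scores)

-- ===== LEMMAS AND PROOFS =====

-- loop invariant for A: the fold keeps the three keys and adds the three branch counts
lemma pvLoopA (l : List Int) (d : PySem.Dict String Int)
    (hk : d.keys = ["pass", "fail", "absent"]) :
    (l.foldl pvStepA d).keys = ["pass", "fail", "absent"] ∧
    (l.foldl pvStepA d).getD "pass" 0
      = d.getD "pass" 0 + ((l.filter (fun i => i != 0 && !decide (i < 40))).length : Int) ∧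
    (l.foldl pvStepA d).getD "fail" 0
      = d.getD "fail" 0 + ((l.filter (fun i => i != 0 && decide (i < 40))).length : Int) ∧
    (l.foldl pvStepA d).getD "absent" 0
      = d.getD "absent" 0 + ((l.filter (fun i => i == 0)).length : Int) := by
  induction l generalizing d with
  | nil => simp [hk]
  | cons x xs ih =>
    have hkeys : (pvStepA d x).keys = ["pass", "fail", "absent"] := by
      unfold pvStepA
      split_ifs <;> rw [PySem.Dict.keys_modify] <;>
        rw [PySem.Dict.keys_insert_of_contains] <;>
        first
          | exact hk
          | (rw [PySem.Dict.contains_eq_decide_mem_keys, hk]; decide)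
    obtain ⟨h1, h2, h3, h4⟩ := ih (pvStepA d x) hkeys
    refine ⟨by simpa using h1, ?_, ?_, ?_⟩ <;>
      simp only [List.foldl_cons, h2, h3, h4, List.filter_cons] <;>
      unfold pvStepA <;>
      by_cases hx0 : x = 0 <;> by_cases hx40 : x < 40 <;>
      (try simp [hx0, hx40, PySem.Dict.getD_modify_self, PySem.Dict.getD_modify_of_ne]) <;>
      (try ring)

-- the binary search on a ≤-sorted list returns a split point: everything left is < x,
-- everything right is ≥ x
lemma pvBisect_spec (a : List Int) (x : Int)
    (hs : a.Pairwise (· ≤ ·)) :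
    ∀ (n lo hi : Nat), hi - lo ≤ n → hi ≤ a.length → lo ≤ hi →
    (∀ j, (hj : j < a.length) → j < lo → a[j] < x) →
    (∀ j, (hj : j < a.length) → hi ≤ j → x ≤ a[j]) →
    pvBisectLeft a x lo hi ≤ a.length ∧
    (∀ j, (hj : j < a.length) → j < pvBisectLeft a x lo hi → a[j] < x) ∧
    (∀ j, (hj : j < a.length) → pvBisectLeft a x lo hi ≤ j → x ≤ a[j]) := by
  have hmono : ∀ (p q : Nat) (hp : p < a.length) (hq : q < a.length), p ≤ q → a[p] ≤ a[q] := by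
    intro p q hp hq hpq
    rcases Nat.lt_or_ge p q with h | h
    · exact (List.pairwise_iff_getElem.mp hs) p q hp hq h
    · have : p = q := by omega
      subst this; exact le_refl _
  intro n
  induction n with
  | zero =>
    intro lo hi hm hhi hlohi hlt hge
    have hle : ¬ lo < hi := by omega
    rw [pvBisectLeft, if_neg hle]
    exact ⟨by omega, fun j hj hjlt => hlt j hj hjlt, fun j hj hjge => hge j hj (by omega)⟩
  | succ n ihn =>
    intro lo hi hm hhi hlohi hlt hge
    rw [pvBisectLeft]
    by_cases h : lo < hi
    · simp only [h, if_true]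
      have hmid : (lo + hi) / 2 < a.length := by omega
      have hget : PySem.List.pyGet? a (((lo + hi) / 2 : Nat) : Int)
          = some (a[(lo + hi) / 2]'hmid) := by
        rw [PySem.List.pyGet?_natCast]
        exact List.getElem?_eq_getElem hmid
      rw [hget]
      simp only []
      by_cases hv : a[(lo + hi) / 2]'hmid < x
      · simp only [if_pos hv]
        exact ihn ((lo + hi) / 2 + 1) hi (by omega) hhi (by omega)
          (fun j hj hjlt => lt_of_le_of_lt (hmono j ((lo + hi) / 2) hj hmid (by omega)) hv) hge
      · simp only [if_neg hv]
        push_neg at hv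
        exact ihn lo ((lo + hi) / 2) (by omega) (by omega) (by omega)
          hlt (fun j hj hjge => le_trans hv (hmono ((lo + hi) / 2) j hmid hj hjge))
    · simp only [h, if_false]
      have : lo = hi := by omega
      subst this
      exact ⟨by omega, fun j hj hjlt => hlt j hj hjlt, fun j hj hjge => hge j hj hjge⟩

-- a split point characterises the count of elements < x
lemma pvCountOfSplit (x : Int) : ∀ (a : List Int) (r : Nat), r ≤ a.length →
    (∀ j, (hj : j < a.length) → j < r → a[j] < x) →
    (∀ j, (hj : j < a.length) → r ≤ j → x ≤ a[j]) →
    (a.filter (fun v => decide (v < x))).length = r := by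
  intro a
  induction a with
  | nil => intro r hr _ _; simp at hr; simp [hr]
  | cons y t ih =>
    intro r hr hlt hge
    cases r with
    | zero =>
      have hy : ¬ (y < x) := by
        have := hge 0 (by simp) (by omega)
        simp at this; omega
      simp only [List.filter_cons, decide_eq_true_eq]
      rw [if_neg (by simpa using hy)]
      exact ih 0 (by omega)
        (fun j hj hjlt => by omega)
        (fun j hj _ => by simpa using hge (j + 1) (by simpa using Nat.succ_lt_succ hj) (by omega))
    | succ r' =>
      have hy : y < x := by simpa using hlt 0 (by simp) (by omega)
      simp only [List.filter_cons, decide_eq_true_eq]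
      rw [if_pos hy, List.length_cons]
      congr 1
      exact ih r' (by simpa using hr)
        (fun j hj hjlt => by simpa using hlt (j + 1) (by simpa using Nat.succ_lt_succ hj) (by omega))
        (fun j hj hjge => by simpa using hge (j + 1) (by simpa using Nat.succ_lt_succ hj) (by omega))

-- the full-range binary search counts the elements < x of a sorted list
lemma pvBisect_count (a : List Int) (x : Int) (hs : a.Pairwise (· ≤ ·)) :
    pvBisectLeft a x 0 a.length = (a.filter (fun v => decide (v < x))).length := by
  obtain ⟨h1, h2, h3⟩ := pvBisect_spec a x hs a.length 0 a.length (by omega) (le_refl _) (by omega)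
    (fun j hj hjlt => by omega) (fun j hj hjge => by omega)
  exact (pvCountOfSplit x a _ h1 h2 h3).symm

-- arithmetic among the filter counts: < 1 splits into < 0 plus = 0;
-- < 40 splits into = 0 plus (≠ 0 ∧ < 40); the three branch counts partition the list
lemma pvCountsArith (l : List Int) :
    (l.filter (fun v => decide (v < 1))).length
      = (l.filter (fun v => decide (v < 0))).length + (l.filter (fun i => i == 0)).length ∧
    (l.filter (fun v => decide (v < 40))).length
      = (l.filter (fun i => i == 0)).length + (l.filter (fun i => i != 0 && decide (i < 40))).length ∧
    (l.filter (fun i => i != 0 && !decide (i < 40))).length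
      + (l.filter (fun i => i != 0 && decide (i < 40))).length
      + (l.filter (fun i => i == 0)).length = l.length := by
  induction l with
  | nil => simp
  | cons y t ih =>
    obtain ⟨a1, a2, a3⟩ := ih
    simp only [List.filter_cons, List.length_cons]
    by_cases h0 : y = 0 <;> by_cases h40 : y < 40 <;> by_cases hneg : y < 0 <;> by_cases h1 : y < 1 <;>
      simp [h0, h40, hneg, h1] <;> omega

-- filtering commutes with the sort, up to length
lemma pvSortFilterLen (scores : List Int) (p : Int → Bool) :
    ((PySem.List.sorted scores (fun x => x) false).filter p).length = (scores.filter p).length :=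
  ((PySem.List.sorted_perm scores (fun x => x) false).filter p).length_eq

-- ===== VERDICT (by name: the statement is the Claim_ definition above) =====
theorem find_pass_fail_absent_spec : Claim_equal_find_pass_fail_absent := by
  intro scores _
  unfold Spec_find_pass_fail_absent find_pass_fail_absent find_pass_fail_absent_alt
  set d0 : PySem.Dict String Int := PySem.Dict.ofList [("pass", 0), ("fail", 0), ("absent", 0)] with hd0
  have hk0 : d0.keys = ["pass", "fail", "absent"] := by rw [hd0]; decide
  obtain ⟨h1, h2, h3, h4⟩ := pvLoopA scores d0 hk0
  have hnd : (scores.foldl pvStepA d0).keys.Nodup := by rw [h1]; decide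
  rw [PySem.Dict.items_eq_map_keys _ hnd 0, h1]
  simp only [List.map_cons, List.map_nil, h2, h3, h4]
  have hgp : d0.getD "pass" (0 : Int) = 0 := by rw [hd0]; decide
  have hgf : d0.getD "fail" (0 : Int) = 0 := by rw [hd0]; decide
  have hga : d0.getD "absent" (0 : Int) = 0 := by rw [hd0]; decide
  rw [hgp, hgf, hga]
  set a := PySem.List.sorted scores (fun x => x) false with ha
  have hs : a.Pairwise (· ≤ ·) := by
    simpa using PySem.List.sorted_pairwise scores (fun x => x)
  have hb40 := pvBisect_count a 40 hs
  have hb0 := pvBisect_count a 0 hs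
  have hb1 := pvBisect_count a 1 hs
  have hf40 := pvSortFilterLen scores (fun v => decide (v < 40))
  have hf0 := pvSortFilterLen scores (fun v => decide (v < 0))
  have hf1 := pvSortFilterLen scores (fun v => decide (v < 1))
  have hfz := pvSortFilterLen scores (fun i => i == 0)
  have hlen : a.length = scores.length := (PySem.List.sorted_perm scores (fun x => x) false).length_eq
  obtain ⟨a1, a2, a3⟩ := pvCountsArith scores
  simp only [zero_add, ha] at *
  rw [hb40, hb0, hb1, hf40, hf0, hf1, hlen]
  refine congrArg₂ _ (congrArg _ ?_) (congrArg₂ _ (congrArg _ ?_) (congrArg₂ _ (congrArg _ ?_) rfl))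
  · omega
  · omega
  · omega
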